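-- pv_equiv track=rewrite | github.com/pawelelel/matura | rozwiazania/Zbior zadan/main.py | czyRownowazne
-- ===== SOURCE A (Python) =====
-- def czyRownowazne(A: str, B: str):
--     litery = []
--     for a in A:
--         if a not in litery:
--             litery.append(a)
--     for b in B:
--         if b not in litery:
--             return 0
--     return 1
-- ===== SOURCE B (Python) =====
-- def czyRownowazne(A: str, B: str):
--     # Sort both strings, then one merge-style scan with a pointer into sorted(A):
--     # for each b (ascending) skip smaller chars of A; b must be found at the pointer.
--     sa = sorted(A)
--     i = 0
--     for b in sorted(B):
--         while i < len(sa) and sa[i] < b: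
--             i += 1
--         if i == len(sa) or sa[i] != b:
--             return 0
--     return 1
-- ===== Notes on version B (the rewrite author's own statement) =====
-- stated objective: alternative
-- what changed: Replaced the dedup-table-then-membership-scan with sort both strings and a single two-pointer merge scan over the sorted lists; correct because char membership is order-independent.
import Mathlib
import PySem

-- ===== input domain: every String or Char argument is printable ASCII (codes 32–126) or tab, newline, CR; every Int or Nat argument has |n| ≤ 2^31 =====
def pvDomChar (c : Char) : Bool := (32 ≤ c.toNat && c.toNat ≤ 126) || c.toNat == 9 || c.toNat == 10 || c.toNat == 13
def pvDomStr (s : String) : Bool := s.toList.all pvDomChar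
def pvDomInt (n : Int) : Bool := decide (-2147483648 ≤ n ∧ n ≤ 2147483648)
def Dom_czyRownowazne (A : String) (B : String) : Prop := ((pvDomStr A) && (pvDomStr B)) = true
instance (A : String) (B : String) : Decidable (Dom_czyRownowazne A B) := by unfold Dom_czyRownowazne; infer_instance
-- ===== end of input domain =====

-- B replaces A's dedup-table + membership scan by sorting both strings and one two-pointer merge scan; same values everywhere.

-- ===== PORT A =====
-- first loop of A: build the list of distinct characters of A in first-occurrence order
def pvLitery : List Char → List Char → List Char
  | [], acc => acc
  | a :: rest, acc => if a ∈ acc then pvLitery rest acc else pvLitery rest (acc ++ [a])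

-- second loop of A: return 0 at the first b not in litery, else 1
def pvScanB (litery : List Char) : List Char → Int
  | [] => 1
  | b :: rest => if b ∈ litery then pvScanB litery rest else 0

def czyRownowazne (A : String) (B : String) : Int :=
  pvScanB (pvLitery A.toList []) B.toList

-- ===== PORT B =====
-- B's inner while loop: advance the pointer into sorted(A) past characters < b
def pvAdvance : List Char → Char → List Char
  | [], _ => []
  | a :: rest, b => if a < b then pvAdvance rest b else a :: rest

-- B's outer for loop over sorted(B), carrying the remaining suffix of sorted(A)
def pvMerge : List Char → List Char → Int
  | _, [] => 1
  | sa, b :: rest =>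
    match pvAdvance sa b with
    | [] => 0
    | a :: sa' => if a ≠ b then 0 else pvMerge (a :: sa') rest

def czyRownowazne_alt (A : String) (B : String) : Int :=
  pvMerge (PySem.List.sorted A.toList (fun c => c) false)
          (PySem.List.sorted B.toList (fun c => c) false)

-- ===== PRECONDITION & SPEC =====
def Spec_czyRownowazne (A : String) (B : String) (out : Int) : Prop := out = czyRownowazne_alt A B
instance (A : String) (B : String) (out : Int) : Decidable (Spec_czyRownowazne A B out) := by unfold Spec_czyRownowazne; infer_instance

-- ===== CLAIM (what is proved, stated in full; the proofs are below) =====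
def Claim_equal_czyRownowazne : Prop := ∀ (A : String) (B : String), Dom_czyRownowazne A B → Spec_czyRownowazne A B (czyRownowazne A B)

-- ===== LEMMAS AND PROOFS =====
theorem mem_pvLitery (c : Char) : ∀ (l acc : List Char), c ∈ pvLitery l acc ↔ c ∈ l ∨ c ∈ acc := by
  intro l
  induction l with
  | nil => intro acc; simp [pvLitery]
  | cons a rest ih =>
    intro acc
    by_cases h : a ∈ acc
    · simp only [pvLitery, if_pos h, ih]
      constructor
      · rintro (h1 | h1) <;> simp_all
      · rintro (h1 | h1)
        · rcases List.mem_cons.mp h1 with rfl | h2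
          · exact Or.inr h
          · exact Or.inl h2
        · exact Or.inr h1
    · simp only [pvLitery, if_neg h, ih]
      simp only [List.mem_append, List.mem_cons]
      tauto

-- A's scan returns 1 iff every char of bs lies in litery
theorem pvScanB_eq (litery : List Char) :
    ∀ (bs : List Char), pvScanB litery bs = if ∀ b ∈ bs, b ∈ litery then 1 else 0 := by
  intro bs
  induction bs with
  | nil => simp [pvScanB]
  | cons b rest ih =>
    by_cases hb : b ∈ litery
    · simp [pvScanB, ih, hb]
    · simp [pvScanB, hb]

-- pvAdvance drops a prefix of elements < b and leaves the rest untouched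
theorem pvAdvance_decomp (b : Char) :
    ∀ (sa : List Char), ∃ pre, sa = pre ++ pvAdvance sa b ∧ ∀ x ∈ pre, x < b := by
  intro sa
  induction sa with
  | nil => exact ⟨[], by simp [pvAdvance]⟩
  | cons a rest ih =>
    by_cases h : a < b
    · obtain ⟨pre, hpre, hlt⟩ := ih
      refine ⟨a :: pre, ?_, ?_⟩
      · simp [pvAdvance, if_pos h, ← hpre]
      · intro x hx; rcases List.mem_cons.mp hx with rfl | hx
        · exact h
        · exact hlt x hx
    · exact ⟨[], by simp [pvAdvance, if_neg h]⟩

theorem pvAdvance_head_not_lt (b : Char) :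
    ∀ (sa : List Char) (a : Char) (sa' : List Char), pvAdvance sa b = a :: sa' → ¬ a < b := by
  intro sa
  induction sa with
  | nil => intro a sa' h; simp [pvAdvance] at h
  | cons x rest ih =>
    intro a sa' h
    by_cases hx : x < b
    · exact ih a sa' (by simpa [pvAdvance, if_pos hx] using h)
    · simp [pvAdvance, if_neg hx] at h
      exact h.1 ▸ hx

-- merge scan on sorted lists computes the membership check
theorem pvMerge_eq (sb : List Char) : ∀ (sa : List Char),
    List.Pairwise (· ≤ ·) sa → List.Pairwise (· ≤ ·) sb →
    pvMerge sa sb = if ∀ b ∈ sb, b ∈ sa then 1 else 0 := by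
  induction sb with
  | nil => intro sa _ _; simp [pvMerge]
  | cons b rest ih =>
    intro sa hsa hsb
    obtain ⟨pre, hdec, hlt⟩ := pvAdvance_decomp b sa
    cases hadv : pvAdvance sa b with
    | nil =>
      have hnb : b ∉ sa := by
        rw [hdec, hadv]; simp only [List.append_nil]
        intro hb; exact lt_irrefl b (hlt b hb)
      simp only [pvMerge, hadv]
      rw [if_neg]; intro hall; exact hnb (hall b (by simp))
    | cons a sa' =>
      have hna : ¬ a < b := pvAdvance_head_not_lt b sa a sa' hadv
      have hsuffix_sorted : List.Pairwise (· ≤ ·) (a :: sa') := by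
        rw [hdec, hadv] at hsa; exact hsa.sublist (List.sublist_append_right pre _)
      by_cases hab : a = b
      · subst hab
        have hrest := ih (a :: sa') hsuffix_sorted hsb.tail
        simp only [pvMerge, hadv]
        rw [if_neg (by simp), hrest]
        congr 1
        apply propext; constructor
        · intro hall x hx
          rcases List.mem_cons.mp hx with rfl | hx
          · rw [hdec, hadv]; simp
          · rw [hdec, hadv]; exact List.mem_append_right pre (hall x hx)
        · intro hall x hx
          have hx_sa : x ∈ sa := hall x (List.mem_cons_of_mem _ hx)
          rw [hdec, hadv] at hx_sa
          rcases List.mem_append.mp hx_sa with hpre | hsuf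
          · exfalso
            have hle : a ≤ x := List.rel_of_pairwise_cons hsb hx
            exact absurd (lt_of_lt_of_le (hlt x hpre) hle) (lt_irrefl x ∘ id)
          · exact hsuf
      · have hbla : b < a := lt_of_le_of_ne (not_lt.mp hna) (Ne.symm hab)
        have hnb : b ∉ sa := by
          rw [hdec, hadv]
          intro hb
          rcases List.mem_append.mp hb with hpre | hsuf
          · exact lt_irrefl b (hlt b hpre)
          · rcases List.mem_cons.mp hsuf with rfl | hsuf
            · exact hab rfl
            · have : a ≤ b := List.rel_of_pairwise_cons hsuffix_sorted hsuf
              exact absurd (lt_of_lt_of_le hbla this) (lt_irrefl b)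
        simp only [pvMerge, hadv, ne_eq, hab, not_false_eq_true, if_true]
        rw [if_neg]; intro hall; exact hnb (hall b (by simp))

-- ===== VERDICT (by name: the statement is the Claim_ definition above) =====
theorem czyRownowazne_spec : Claim_equal_czyRownowazne := by
  intro A B _
  unfold Spec_czyRownowazne czyRownowazne czyRownowazne_alt
  rw [pvScanB_eq, pvMerge_eq _ _ (PySem.List.sorted_pairwise _ _) (PySem.List.sorted_pairwise _ _)]
  congr 1
  apply propext; constructor
  · intro hall b hb
    have : b ∈ B.toList := (PySem.List.mem_sorted _ _ _ _).mp hb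
    have := hall b this
    rw [mem_pvLitery] at this
    rcases this with h | h
    · exact (PySem.List.mem_sorted _ _ _ _).mpr h
    · simp at h
  · intro hall b hb
    have : b ∈ PySem.List.sorted B.toList (fun c => c) false := (PySem.List.mem_sorted _ _ _ _).mpr hb
    have := hall b this
    rw [mem_pvLitery]
    exact Or.inl ((PySem.List.mem_sorted _ _ _ _).mp this)
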